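-- pv_equiv track=rewrite | github.com/yonggithub/excel-mcp-server | src/excel_mcp/cell_utils.py | validate_cell_reference
-- ===== SOURCE A (Python) =====
-- def validate_cell_reference(cell_ref: str) -> bool:
--     """Validate Excel cell reference format (e.g., 'A1', 'BC123')"""
--     if not cell_ref:
--         return False
--
--     # Split into column and row parts
--     col = row = ""
--     for c in cell_ref:
--         if c.isalpha():
--             if row:  # Letters after numbers not allowed
--                 return False
--             col += c
--         elif c.isdigit():
--             row += c
--         else:
--             return False
--
--     return bool(col and row)
-- ===== SOURCE B (Python) =====
-- def validate_cell_reference(cell_ref: str) -> bool: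
--     """Validate Excel cell reference format (e.g., 'A1', 'BC123')"""
--     i = 0
--     while i < len(cell_ref) and cell_ref[i].isalpha():
--         i += 1
--     col, row = cell_ref[:i], cell_ref[i:]
--     return bool(col) and bool(row) and row.isdigit()
-- ===== Notes on version B (the rewrite author's own statement) =====
-- stated objective: idiomatic
-- what changed: A's single-pass two-accumulator state machine (col/row strings with early returns) is replaced by splitting the string at the end of the leading letter run and validating the tail with str.isdigit().
import Mathlib
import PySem

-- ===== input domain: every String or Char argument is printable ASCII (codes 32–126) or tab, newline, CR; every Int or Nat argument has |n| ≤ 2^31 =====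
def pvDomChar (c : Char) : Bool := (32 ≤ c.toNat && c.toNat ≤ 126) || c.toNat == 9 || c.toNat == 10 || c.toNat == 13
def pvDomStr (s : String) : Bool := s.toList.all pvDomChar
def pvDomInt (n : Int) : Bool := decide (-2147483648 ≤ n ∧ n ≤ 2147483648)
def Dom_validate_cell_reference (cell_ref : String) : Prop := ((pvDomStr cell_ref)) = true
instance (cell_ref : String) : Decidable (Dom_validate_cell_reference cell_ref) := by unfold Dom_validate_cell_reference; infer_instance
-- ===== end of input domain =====

-- B replaces A's two-accumulator state machine by splitting off the leading letter run
-- and validating the tail with str.isdigit() (same value on every input).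

-- ===== PORT A =====
-- the for-loop of A: state = (col, row) accumulator strings, early returns become Bool results
def pvALoop : List Char → List Char → List Char → Bool
  | [], col, row => !col.isEmpty && !row.isEmpty
  | c :: cs, col, row =>
    if PySem.Chars.isalpha c then
      if !row.isEmpty then false
      else pvALoop cs (col ++ [c]) row
    else if PySem.Chars.isdigit c then
      pvALoop cs col (row ++ [c])
    else
      false

def validate_cell_reference (cell_ref : String) : Bool :=
  if cell_ref.toList.isEmpty then false
  else pvALoop cell_ref.toList [] []

-- ===== PORT B =====
-- the while loop counting the leading isalpha() run and the cell_ref[:i]/cell_ref[i:] split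
-- are takeWhile/dropWhile of isalpha; row.isdigit() is PySem.Chars.strIsdigit
def validate_cell_reference_alt (cell_ref : String) : Bool :=
  let col := cell_ref.toList.takeWhile PySem.Chars.isalpha
  let row := cell_ref.toList.dropWhile PySem.Chars.isalpha
  !col.isEmpty && (!row.isEmpty && PySem.Chars.strIsdigit row)

-- ===== PRECONDITION & SPEC =====
def Spec_validate_cell_reference (cell_ref : String) (out : Bool) : Prop := out = validate_cell_reference_alt cell_ref
instance (cell_ref : String) (out : Bool) : Decidable (Spec_validate_cell_reference cell_ref out) := by unfold Spec_validate_cell_reference; infer_instance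

-- ===== CLAIM (what is proved, stated in full; the proofs are below) =====
def Claim_equal_validate_cell_reference : Prop := ∀ (cell_ref : String), Dom_validate_cell_reference cell_ref → Spec_validate_cell_reference cell_ref (validate_cell_reference cell_ref)

-- ===== LEMMAS AND PROOFS =====

theorem pv_alpha_not_digit (c : Char) (h : PySem.Chars.isalpha c = true) :
    PySem.Chars.isdigit c = false := by
  simp [PySem.Chars.isalpha, PySem.Chars.isupper, PySem.Chars.islower, Char.le_def,
    UInt32.le_iff_toNat_le] at h
  simp [PySem.Chars.isdigit, Char.le_def, UInt32.le_iff_toNat_le]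
  omega

-- once row is nonempty, A only keeps accepting digits
theorem pvALoop_row_nonempty (cs : List Char) : ∀ col row : List Char, row ≠ [] →
    pvALoop cs col row = (!col.isEmpty && cs.all PySem.Chars.isdigit) := by
  induction cs with
  | nil =>
    intro col row hr
    simp [pvALoop, hr]
  | cons c cs ih =>
    intro col row hr
    by_cases ha : PySem.Chars.isalpha c = true
    · simp [pvALoop, ha, hr, pv_alpha_not_digit c ha]
    · by_cases hd : PySem.Chars.isdigit c = true
      · simp only [pvALoop, ha, hd, if_true, if_false, Bool.false_eq_true]
        rw [ih col (row ++ [c]) (by simp)]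
        simp [hd]
      · simp [pvALoop, ha, hd]

-- A's loop from an all-letters-so-far state equals B's split-and-check
theorem pvALoop_row_empty (cs : List Char) : ∀ col : List Char,
    pvALoop cs col [] =
      (!(col ++ cs.takeWhile PySem.Chars.isalpha).isEmpty &&
        (!(cs.dropWhile PySem.Chars.isalpha).isEmpty &&
          PySem.Chars.strIsdigit (cs.dropWhile PySem.Chars.isalpha))) := by
  induction cs with
  | nil => intro col; simp [pvALoop]
  | cons c cs ih =>
    intro col
    by_cases ha : PySem.Chars.isalpha c = true
    · simp only [pvALoop, ha, if_true, List.isEmpty_nil, Bool.not_false, Bool.false_eq_true,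
        if_false, List.takeWhile_cons_of_pos, List.dropWhile_cons_of_pos]
      rw [ih (col ++ [c])]
      simp
    · by_cases hd : PySem.Chars.isdigit c = true
      · simp only [pvALoop, ha, hd, Bool.false_eq_true, if_false, if_true, List.nil_append]
        rw [pvALoop_row_nonempty cs col [c] (by simp),
          List.takeWhile_cons_of_neg (by simp [ha]),
          List.dropWhile_cons_of_neg (by simp [ha])]
        simp [PySem.Chars.strIsdigit, hd]
      · rw [List.takeWhile_cons_of_neg (by simp [ha]),
          List.dropWhile_cons_of_neg (by simp [ha])]
        simp [pvALoop, ha, hd, PySem.Chars.strIsdigit]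

-- ===== VERDICT (by name: the statement is the Claim_ definition above) =====
theorem validate_cell_reference_spec : Claim_equal_validate_cell_reference := by
  intro cell_ref _
  unfold Spec_validate_cell_reference validate_cell_reference validate_cell_reference_alt
  cases h : cell_ref.toList with
  | nil => simp
  | cons c cs =>
    simp only [List.isEmpty_cons, Bool.false_eq_true, if_false]
    rw [pvALoop_row_empty (c :: cs) []]
    simp
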